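-- pv_equiv track=rewrite | github.com/tquintas/concelhodiario | doomsday.py | doomsday
-- ===== SOURCE A (Python) =====
-- def isLeapYear(y):
--     """Check if the given year is a leap year or not"""
--     if (y%4==0 and y%100!=0) or y%400==0:
--         return True
--     else:
--         return False
--
-- def doomsday(y):
--     """Return the name of the doomsday"""
--     doomsday.doom={1:3,2:28,3:14,4:4,6:6,7:4,8:8,10:10,12:12}
--     if isLeapYear(y):
--         doomsday.doom[1]=4
--         doomsday.doom[2]=29
--     anchor=[2,0,5,3]
--     cent=(y//400)%4
--     anchor_day=anchor[cent]
--     diff=y-cent*100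
--     leap=0
--     for year in range(cent*100+1,y+1):
--         if isLeapYear(year):
--             leap+=1
--     dday=(anchor_day+diff+leap)%7
--     doomsday.day={(doomsday.doom.get(n),n):dday for n in doomsday.doom}
--     return dday
-- ===== SOURCE B (Python) =====
-- def _leaps_upto(n):
--     """Number of leap years k with 1 <= k <= n (floor formula; exact for negative n too)."""
--     return n // 4 - n // 100 + n // 400
--
-- def doomsday(y):
--     """Return the name of the doomsday"""
--     cent = (y // 400) % 4
--     anchor_day = (2, 0, 5, 3)[cent]
--     m = cent * 100
--     leap = _leaps_upto(y) - _leaps_upto(m) if y > m else 0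
--     return (anchor_day + (y - m) + leap) % 7
-- ===== Notes on version B (the rewrite author's own statement) =====
-- stated objective: faster
-- what changed: Replaces the O(y) per-year leap-year counting loop with the closed-form floor formula n//4 - n//100 + n//400, making the whole function O(1); the write-only doomsday.doom/doomsday.day function attributes (which never affect the return value) are dropped.
import Mathlib
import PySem

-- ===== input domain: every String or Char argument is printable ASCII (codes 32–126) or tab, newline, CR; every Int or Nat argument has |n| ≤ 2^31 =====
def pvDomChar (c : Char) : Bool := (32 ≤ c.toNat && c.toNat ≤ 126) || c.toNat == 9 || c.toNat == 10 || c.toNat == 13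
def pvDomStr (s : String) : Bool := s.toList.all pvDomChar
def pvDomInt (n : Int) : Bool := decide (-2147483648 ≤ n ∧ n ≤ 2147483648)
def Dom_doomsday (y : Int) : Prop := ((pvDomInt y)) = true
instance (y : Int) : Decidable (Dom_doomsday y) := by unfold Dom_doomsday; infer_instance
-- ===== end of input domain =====

-- B replaces A's O(y) per-year leap-counting loop with the closed-form floor formula (O(1)).
-- A's function attributes doomsday.doom / doomsday.day are write-only side state that never
-- affects the return value; the equivalence proved here is about the RETURN value only
-- (the attribute dicts are ported as unused lets / omitted).

-- ===== PORT A =====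
def isLeapYear (y : Int) : Bool :=
  if (PySem.Int.mod y 4 == 0 && !(PySem.Int.mod y 100 == 0)) || PySem.Int.mod y 400 == 0 then
    true
  else
    false

def doomsday (y : Int) : Int :=
  -- doomsday.doom: write-only attribute dict, kept as an unused let
  let _doom : PySem.Dict Int Int :=
    PySem.Dict.ofList [(1,3),(2,28),(3,14),(4,4),(6,6),(7,4),(8,8),(10,10),(12,12)]
  let _doom := if isLeapYear y then (_doom.insert 1 4).insert 2 29 else _doom
  let anchor : List Int := [2,0,5,3]
  let cent := PySem.Int.mod (PySem.Int.floordiv y 400) 4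
  let anchor_day := PySem.List.pyGetD anchor cent 0   -- cent ∈ [0,3], so anchor[cent] never raises
  let diff := y - cent * 100
  let leap := (PySem.List.pyRange (cent * 100 + 1) (y + 1) 1).foldl
    (fun leap year => if isLeapYear year then leap + 1 else leap) 0
  let dday := PySem.Int.mod (anchor_day + diff + leap) 7
  -- doomsday.day: write-only attribute dict built from _doom and dday; never read, omitted
  dday

-- ===== PORT B =====
def leapsUpto (n : Int) : Int :=
  PySem.Int.floordiv n 4 - PySem.Int.floordiv n 100 + PySem.Int.floordiv n 400

def doomsday_alt (y : Int) : Int :=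
  let cent := PySem.Int.mod (PySem.Int.floordiv y 400) 4
  let anchor_day := PySem.List.pyGetD [2,0,5,3] cent 0
  let m := cent * 100
  let leap := if y > m then leapsUpto y - leapsUpto m else 0
  PySem.Int.mod (anchor_day + (y - m) + leap) 7

-- ===== PRECONDITION & SPEC =====
def Spec_doomsday (y : Int) (out : Int) : Prop := out = doomsday_alt y
instance (y : Int) (out : Int) : Decidable (Spec_doomsday y out) := by unfold Spec_doomsday; infer_instance

-- ===== CLAIM (what is proved, stated in full; the proofs are below) =====
def Claim_equal_doomsday : Prop := ∀ (y : Int), Dom_doomsday y → Spec_doomsday y (doomsday y)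

-- ===== LEMMAS AND PROOFS =====

-- one step of the closed form: crossing year y adds 1 exactly when y is a leap year
lemma leapsUpto_step (y : Int) :
    leapsUpto y - leapsUpto (y - 1) = (if isLeapYear y then 1 else 0) := by
  have hiff : isLeapYear y = true ↔ ((y % 4 = 0 ∧ y % 100 ≠ 0) ∨ y % 400 = 0) := by
    simp [isLeapYear,
      PySem.Int.mod_eq_emod_of_pos (a := y) (by norm_num : (0:Int) < 4),
      PySem.Int.mod_eq_emod_of_pos (a := y) (by norm_num : (0:Int) < 100),
      PySem.Int.mod_eq_emod_of_pos (a := y) (by norm_num : (0:Int) < 400)]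
  simp only [leapsUpto,
    PySem.Int.floordiv_eq_ediv_of_pos (a := y) (by norm_num : (0:Int) < 4),
    PySem.Int.floordiv_eq_ediv_of_pos (a := y) (by norm_num : (0:Int) < 100),
    PySem.Int.floordiv_eq_ediv_of_pos (a := y) (by norm_num : (0:Int) < 400),
    PySem.Int.floordiv_eq_ediv_of_pos (a := y - 1) (by norm_num : (0:Int) < 4),
    PySem.Int.floordiv_eq_ediv_of_pos (a := y - 1) (by norm_num : (0:Int) < 100),
    PySem.Int.floordiv_eq_ediv_of_pos (a := y - 1) (by norm_num : (0:Int) < 400)]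
  by_cases h : ((y % 4 = 0 ∧ y % 100 ≠ 0) ∨ y % 400 = 0)
  · rw [if_pos (hiff.mpr h)]
    omega
  · rw [if_neg (fun hh => h (hiff.mp hh))]
    push_neg at h
    omega

-- A's loop over range(m+1, y+1) counts exactly leapsUpto y - leapsUpto m
lemma count_eq (m : Int) : ∀ (n : Nat) (y : Int), y = m + n →
    (PySem.List.pyRange (m + 1) (y + 1) 1).foldl
      (fun leap year => if isLeapYear year then leap + 1 else leap) 0
      = leapsUpto y - leapsUpto m := by
  intro n
  induction n with
  | zero =>
    intro y hy
    have hym : y = m := by push_cast at hy; omega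
    subst hym
    rw [PySem.List.pyRange_one_eq_nil (by omega)]
    simp
  | succ k ih =>
    intro y hy
    rw [PySem.List.pyRange_one_succ_right (by push_cast at hy; omega), List.foldl_append]
    have h1 : PySem.List.pyRange (m + 1) y 1 = PySem.List.pyRange (m + 1) ((y - 1) + 1) 1 := by
      norm_num
    rw [h1, ih (y - 1) (by push_cast at hy ⊢; omega)]
    simp only [List.foldl_cons, List.foldl_nil]
    have := leapsUpto_step y
    split_ifs with hl <;> simp [hl] at this <;> omega

-- ===== VERDICT (by name: the statement is the Claim_ definition above) =====
theorem doomsday_spec : Claim_equal_doomsday := by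
  intro y _
  unfold Spec_doomsday doomsday doomsday_alt
  simp only []
  set cent := PySem.Int.mod (PySem.Int.floordiv y 400) 4 with hcent
  by_cases h : y > cent * 100
  · rw [if_pos h, count_eq (cent * 100) (y - cent * 100).toNat y (by omega)]
  · rw [if_neg h, PySem.List.pyRange_one_eq_nil (by omega)]
    simp
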